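-- pv_equiv track=rewrite | github.com/clementsoubrier/AFM-pipeline | peaks_troughs/preprocess.py | double_intersection
-- ===== SOURCE A (Python) =====
-- from heapq import heapify, heappop
--
-- def double_intersection(xs, ys):
--     if ys[-1] < ys[0]:
--         xs, ys = double_intersection(xs[:: -1], ys[:: -1])
--         return xs[:: -1], ys[:: -1]
--     heap = list(ys)
--     heapify(heap)
--     i = 0
--     try:
--         while heappop(heap) == ys[i]:
--             i += 1
--     except IndexError:
--         return xs, ys
--     if i:
--         i -= 1
--     return xs[i:], ys[i:]
-- ===== SOURCE B (Python) =====
-- def double_intersection(xs, ys):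
--     # One linear pass (suffix minima) instead of heapify + repeated heappop.
--     rev = ys[-1] < ys[0]
--     if rev:
--         xs = xs[::-1]
--         ys = ys[::-1]
--     n = len(ys)
--     # smin[t] = min(ys[t:]), built right-to-left
--     smin = []
--     mn = ys[-1]
--     for v in reversed(ys):
--         if v < mn:
--             mn = v
--         smin.append(mn)
--     smin.reverse()
--     # m = first index where ys stops agreeing with the sorted order
--     m = n
--     for t in range(n):
--         if ys[t] != smin[t]:
--             m = t
--             break
--     if m == n:
--         res = (xs, ys)
--     else:
--         i = m - 1 if m else 0
--         res = (xs[i:], ys[i:])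
--     if rev:
--         return res[0][::-1], res[1][::-1]
--     return res
-- ===== Notes on version B (the rewrite author's own statement) =====
-- stated objective: faster
-- what changed: Replaces the heapify + repeated-heappop comparison against the prefix by a single right-to-left suffix-minimum pass followed by a first-mismatch scan (ys agrees with its sorted order at t exactly when ys[t] = min(ys[t:])).
import Mathlib
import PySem

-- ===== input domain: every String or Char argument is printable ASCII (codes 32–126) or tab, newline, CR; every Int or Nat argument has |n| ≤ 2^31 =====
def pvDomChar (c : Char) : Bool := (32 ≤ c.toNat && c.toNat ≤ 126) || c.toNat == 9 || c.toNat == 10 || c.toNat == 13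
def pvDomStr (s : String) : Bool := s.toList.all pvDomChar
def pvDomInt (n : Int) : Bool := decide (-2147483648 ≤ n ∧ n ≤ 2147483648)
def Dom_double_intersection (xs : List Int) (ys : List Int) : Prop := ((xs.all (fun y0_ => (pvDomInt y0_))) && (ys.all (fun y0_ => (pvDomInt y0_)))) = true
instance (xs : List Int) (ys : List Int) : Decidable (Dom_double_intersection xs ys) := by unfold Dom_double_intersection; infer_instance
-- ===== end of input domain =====

-- B replaces heapify + repeated heappop (O(n log n)) by one linear suffix-minimum pass; return values only (A rebinds, never mutates).

-- ===== PORT A =====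
-- 'ys[-1] < ys[0]' (False is never reached on [] : Python raises IndexError there, excluded by Pre_)
def diCond (ys : List Int) : Bool :=
  match PySem.List.pyGet? ys (-1), PySem.List.pyGet? ys 0 with
  | some a, some b => a < b
  | _, _ => false

-- the recursive call's argument is reversed, on which the guard is false (cited by decreasing_by)
theorem diCond_reverse_eq_false {ys : List Int} (h : diCond ys = true) : diCond ys.reverse = false := by
  unfold diCond at *
  simp only [PySem.List.pyGet?_neg_one, PySem.List.pyGet?_zero, List.getLast?_reverse,
    List.head?_reverse, ← List.head?_eq_getElem?] at *
  cases hh : ys.head? <;> cases hl : ys.getLast? <;> simp [hh, hl] at h ⊢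
  omega

-- 'while heappop(heap) == ys[i]: i += 1' ; none = IndexError (heap exhausted)
def diLoop (ys : List Int) : List Int → Nat → Option Nat
  | [], _ => none
  | v :: rest, i =>
    if PySem.List.pyGet? ys (i : Int) = some v then diLoop ys rest (i + 1) else some i

-- heapify + repeated heappop of a list of ints pops its elements exactly in sorted order:
-- the pop sequence is PySem.List.sorted ys; the pop-by-pop comparison loop is kept as diLoop
def diCore (xs : List Int) (ys : List Int) : List Int × List Int :=
  match diLoop ys (PySem.List.sorted ys (fun y => y) false) 0 with
  | none => (xs, ys)
  | some i =>
    let i := if i ≠ 0 then i - 1 else i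
    -- xs[i:] / ys[i:] with i ≥ 0
    (PySem.List.slice xs (some (i : Int)) none, PySem.List.slice ys (some (i : Int)) none)

def double_intersection (xs : List Int) (ys : List Int) : List Int × List Int :=
  if h : diCond ys then
    -- xs[::-1] / ys[::-1] is reverse (PySem.List.slice?_none_none_neg_one)
    let p := double_intersection xs.reverse ys.reverse
    (p.1.reverse, p.2.reverse)
  else diCore xs ys
termination_by (if diCond ys then 1 else 0)
decreasing_by simp [diCond_reverse_eq_false h, h]

-- ===== PORT B =====
-- 'ys[-1] < ys[0]' as in Source B
def diCondB (ys : List Int) : Bool :=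
  match PySem.List.pyGet? ys (-1), PySem.List.pyGet? ys 0 with
  | some a, some b => a < b
  | _, _ => false

-- 'for t in range(n): if ys[t] != smin[t]: m = t; break' (m = n when no break)
def bFind (ys smin : List Int) (t : Nat) : Nat :=
  if t < ys.length then
    if PySem.List.pyGet? ys (t : Int) ≠ PySem.List.pyGet? smin (t : Int) then t
    else bFind ys smin (t + 1)
  else ys.length
termination_by ys.length - t

-- _core of Source B
def altCore (xs : List Int) (ys : List Int) : List Int × List Int :=
  let n := ys.length
  -- smin built right-to-left ('for v in reversed(ys)' with append), then reversed
  let smin := ((ys.reverse.foldl (fun (st : Int × List Int) v =>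
      let mn := if v < st.1 then v else st.1
      (mn, st.2 ++ [mn])) ((PySem.List.pyGet? ys (-1)).getD 0, [])).2).reverse
  let m := bFind ys smin 0
  if m = n then (xs, ys)
  else
    let i := if m ≠ 0 then m - 1 else m
    (PySem.List.slice xs (some (i : Int)) none, PySem.List.slice ys (some (i : Int)) none)

def double_intersection_alt (xs : List Int) (ys : List Int) : List Int × List Int :=
  if diCondB ys then
    let p := altCore xs.reverse ys.reverse
    (p.1.reverse, p.2.reverse)
  else altCore xs ys

-- ===== PRECONDITION & SPEC =====
-- Python A raises IndexError on ys = [] (at ys[-1]); B raises there too.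
def Pre_double_intersection (xs : List Int) (ys : List Int) : Prop := ys ≠ []
instance (xs : List Int) (ys : List Int) : Decidable (Pre_double_intersection xs ys) := by unfold Pre_double_intersection; infer_instance
def pvWitness_double_intersection : List Int × List Int := ([1, 2], [3, 1, 2])

def Spec_double_intersection (xs : List Int) (ys : List Int) (out : List Int × List Int) : Prop := out = double_intersection_alt xs ys
instance (xs : List Int) (ys : List Int) (out : List Int × List Int) : Decidable (Spec_double_intersection xs ys out) := by unfold Spec_double_intersection; infer_instance

-- ===== CLAIM (what is proved, stated in full; the proofs are below) =====
def Claim_equal_double_intersection : Prop := ∀ (xs : List Int) (ys : List Int), Dom_double_intersection xs ys → Pre_double_intersection xs ys → Spec_double_intersection xs ys (double_intersection xs ys)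

-- ===== LEMMAS AND PROOFS =====

-- minimum of a nonempty list (proof-side specification value)
def myMin : List Int → Int
  | [] => 0
  | [v] => v
  | v :: r => min v (myMin (r))

-- suffix minima, structurally (proof-side)
def sufmin : List Int → List Int
  | [] => []
  | v :: rest => myMin (v :: rest) :: sufmin rest

theorem myMin_cons (v : Int) (r : List Int) (h : r ≠ []) : myMin (v :: r) = min v (myMin r) := by
  cases r with
  | nil => simp at h
  | cons w t => simp [myMin]

theorem myMin_mem : ∀ {l : List Int}, l ≠ [] → myMin l ∈ l := by
  intro l
  induction l with
  | nil => simp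
  | cons v r ih =>
    intro _
    rcases eq_or_ne r [] with hr | hr
    · subst hr; simp [myMin]
    · rw [myMin_cons v r hr]
      rcases le_total v (myMin r) with h1 | h1
      · simp [min_eq_left h1]
      · rw [min_eq_right h1]; exact List.mem_cons_of_mem _ (ih hr)

theorem myMin_le : ∀ {l : List Int} {x : Int}, x ∈ l → myMin l ≤ x := by
  intro l
  induction l with
  | nil => simp
  | cons v r ih =>
    intro x hx
    rcases eq_or_ne r [] with hr | hr
    · subst hr; simp at hx; simp [myMin, hx]
    · rw [myMin_cons v r hr]
      rcases List.mem_cons.mp hx with h | h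
      · exact h ▸ min_le_left _ _
      · exact le_trans (min_le_right _ _) (ih h)

theorem sufmin_getElem? (l : List Int) (t : Nat) (ht : t < l.length) :
    (sufmin l)[t]? = some (myMin (l.drop t)) := by
  induction l generalizing t with
  | nil => simp at ht
  | cons v r ih =>
    cases t with
    | zero => simp [sufmin]
    | succ t =>
      simp only [sufmin, List.getElem?_cons_succ, List.drop_succ_cons]
      exact ih t (by simpa using ht)

-- the append-building fold of Source B computes (min l, reverse (sufmin l))
theorem fold_smin (l : List Int) (h : l ≠ []) :
    l.reverse.foldl (fun (st : Int × List Int) v =>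
      let mn := if v < st.1 then v else st.1
      (mn, st.2 ++ [mn])) ((PySem.List.pyGet? l (-1)).getD 0, [])
    = (myMin l, (sufmin l).reverse) := by
  induction l with
  | nil => simp at h
  | cons v r ih =>
    rcases eq_or_ne r [] with hr | hrne
    · subst hr
      simp [PySem.List.pyGet?, PySem.List.pyIdx?, myMin, sufmin]
    · have hlast : PySem.List.pyGet? (v :: r) (-1) = PySem.List.pyGet? r (-1) := by
        rw [PySem.List.pyGet?_neg_one, PySem.List.pyGet?_neg_one]
        cases r with
        | nil => simp at hrne
        | cons b tt => simp [List.getLast?_cons_cons]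
      have hrev : (v :: r).reverse = r.reverse ++ [v] := by simp
      rw [hrev, List.foldl_append, hlast, ih hrne]
      have hmm : myMin (v :: r) = min v (myMin r) := myMin_cons v r hrne
      have hmin : (if v < myMin r then v else myMin r) = min v (myMin r) := by
        rcases lt_or_ge v (myMin r) with h1 | h1
        · simp [h1, min_eq_left h1.le]
        · simp [not_lt.mpr h1, min_eq_right h1]
      simp only [List.foldl_cons, List.foldl_nil, hmin, ← hmm, sufmin]
      simp [hmm]

-- sorted(ys)[t] is the minimum of ys[t:] as long as the prefix before t matches
theorem sorted_getElem?_of_take_eq (ys : List Int) (t : Nat) (ht : t < ys.length)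
    (hpre : (PySem.List.sorted ys (fun y => y) false).take t = ys.take t) :
    (PySem.List.sorted ys (fun y => y) false)[t]? = some (myMin (ys.drop t)) := by
  set s := PySem.List.sorted ys (fun y => y) false with hs
  have hperm : s.Perm ys := PySem.List.sorted_perm ys (fun y => y) false
  have hlen : s.length = ys.length := hperm.length_eq
  have hdropperm : (s.drop t).Perm (ys.drop t) := by
    have h1 : s.take t ++ s.drop t = s := List.take_append_drop t s
    have h2 : ys.take t ++ ys.drop t = ys := List.take_append_drop t ys
    have hstep : (s.take t ++ s.drop t).Perm (ys.take t ++ ys.drop t) := by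
      rw [h1, h2]; exact hperm
    rw [hpre] at hstep
    exact (List.perm_append_left_iff _).mp hstep
  have hpair : s.Pairwise (fun a b => a ≤ b) := PySem.List.sorted_pairwise ys (fun y => y)
  have hdropne : s.drop t ≠ [] := by
    apply List.ne_nil_of_length_pos
    simp [hlen]
    omega
  obtain ⟨hd, tl, hcons⟩ := List.exists_cons_of_ne_nil hdropne
  have hdpair : (s.drop t).Pairwise (fun a b => a ≤ b) := List.Pairwise.drop hpair
  have hhdle : ∀ x ∈ s.drop t, hd ≤ x := by
    intro x hx
    rw [hcons] at hx hdpair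
    rcases List.mem_cons.mp hx with h | h
    · exact h ▸ le_refl _
    · exact (List.pairwise_cons.mp hdpair).1 x h
  have hysdropne : ys.drop t ≠ [] := by
    intro hnil; rw [hnil] at hdropperm
    rw [List.perm_nil] at hdropperm
    exact hdropne hdropperm
  have hmemmin : myMin (ys.drop t) ∈ s.drop t := hdropperm.symm.subset (myMin_mem hysdropne)
  have hhdmem : hd ∈ ys.drop t := hdropperm.subset (by rw [hcons]; simp)
  have heq : hd = myMin (ys.drop t) := le_antisymm (hhdle _ hmemmin) (myMin_le hhdmem)
  have hgoal : s[t]? = (s.drop t).head? := List.head?_drop.symm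
  rw [hgoal, hcons, heq]
  rfl

-- lockstep: A's pop-comparison loop and B's first-mismatch scan agree
theorem lockstep (ys : List Int) : ∀ (k t : Nat), t + k = ys.length →
    (PySem.List.sorted ys (fun y => y) false).take t = ys.take t →
    diLoop ys ((PySem.List.sorted ys (fun y => y) false).drop t) t
      = (if bFind ys (sufmin ys) t = ys.length then none else some (bFind ys (sufmin ys) t)) := by
  intro k
  induction k with
  | zero =>
    intro t htk hpre
    set s := PySem.List.sorted ys (fun y => y) false with hs
    have hlen : s.length = ys.length := (PySem.List.sorted_perm ys (fun y => y) false).length_eq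
    have hdrop : s.drop t = [] := by
      apply List.eq_nil_of_length_eq_zero
      simp [hlen]; omega
    have hbf : bFind ys (sufmin ys) t = ys.length := by
      rw [bFind]
      simp
      omega
    rw [hdrop, hbf]
    simp [diLoop]
  | succ k ih =>
    intro t htk hpre
    set s := PySem.List.sorted ys (fun y => y) false with hs
    have hlen : s.length = ys.length := (PySem.List.sorted_perm ys (fun y => y) false).length_eq
    have ht : t < ys.length := by omega
    have hst : s[t]? = some (myMin (ys.drop t)) := sorted_getElem?_of_take_eq ys t ht hpre
    have hdropcons : s.drop t = myMin (ys.drop t) :: s.drop (t + 1) := by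
      have h1 : t < s.length := by omega
      have hg : s[t] = myMin (ys.drop t) := by
        have := List.getElem?_eq_getElem h1
        rw [this] at hst
        exact Option.some.inj hst
      rw [List.drop_eq_getElem_cons h1, hg]
    have hysget : PySem.List.pyGet? ys (t : Int) = ys[t]? := PySem.List.pyGet?_natCast ys t
    have hsmget : PySem.List.pyGet? (sufmin ys) (t : Int) = (sufmin ys)[t]? :=
      PySem.List.pyGet?_natCast (sufmin ys) t
    have hsm : (sufmin ys)[t]? = some (myMin (ys.drop t)) := sufmin_getElem? ys t ht
    have hyst : ys[t]? = some ys[t] := List.getElem?_eq_getElem ht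
    have hbf : bFind ys (sufmin ys) t =
        if some ys[t] ≠ some (myMin (ys.drop t)) then t else bFind ys (sufmin ys) (t + 1) := by
      rw [bFind]
      rw [if_pos ht, hysget, hsmget, hsm, hyst]
    rw [hdropcons]
    simp only [diLoop, hysget, hyst]
    by_cases hcase : ys[t] = myMin (ys.drop t)
    · have hpre2 : s.take (t + 1) = ys.take (t + 1) := by
        rw [List.take_add_one, List.take_add_one, hpre, hst, hyst, hcase]
      have hbt : bFind ys (sufmin ys) t = bFind ys (sufmin ys) (t + 1) := by
        rw [hbf, if_neg (by simp [hcase])]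
      rw [hbt, if_pos (by rw [hcase])]
      exact ih (t + 1) (by omega) hpre2
    · have hbt : bFind ys (sufmin ys) t = t := by
        rw [hbf, if_pos (by simp [hcase])]
      rw [hbt, if_neg (by simp [hcase]), if_neg (by omega)]

-- the two cores coincide on nonempty ys
theorem core_eq (xs ys : List Int) (h : ys ≠ []) : diCore xs ys = altCore xs ys := by
  unfold diCore altCore
  rw [fold_smin ys h]
  simp only [List.reverse_reverse]
  have hlock := lockstep ys ys.length 0 (by omega) (by simp)
  rw [List.drop_zero] at hlock
  rw [hlock]
  by_cases hm : bFind ys (sufmin ys) 0 = ys.length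
  · simp [hm]
  · simp [hm]

theorem diCondB_eq (ys : List Int) : diCondB ys = diCond ys := rfl

theorem reverse_ne_nil {ys : List Int} (h : ys ≠ []) : ys.reverse ≠ [] := by
  simpa using h

-- ===== VERDICT (by name: the statement is the Claim_ definition above) =====
theorem double_intersection_spec : Claim_equal_double_intersection := by
  intro xs ys _ hpre
  unfold Spec_double_intersection
  unfold double_intersection double_intersection_alt
  rw [diCondB_eq]
  by_cases h : diCond ys
  · rw [dif_pos h, if_pos h]
    unfold double_intersection
    rw [dif_neg (by simp [diCond_reverse_eq_false h])]
    rw [core_eq _ _ (reverse_ne_nil hpre)]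
  · rw [dif_neg h, if_neg h]
    exact core_eq xs ys hpre
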